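-- pv_equiv track=rewrite | github.com/volodymyrd/makemore | python/makemore-v2.py | training_set
-- ===== SOURCE A (Python) =====
-- def training_set(words, stoi):
--     xs, ys = [], []
--     for w in words:
--         chs = ['.'] + list(w) + ['.']
--         for ch1, ch2 in zip(chs, chs[1:]):
--             ix1 = stoi[ch1]
--             ix2 = stoi[ch2]
--             xs.append(ix1)
--             ys.append(ix2)
--
--     return xs, ys
-- ===== SOURCE B (Python) =====
-- def training_set(words, stoi):
--     xs, ys = [], []
--     for w in words:
--         prev = stoi['.']
--         for c in w:
--             cur = stoi[c]
--             xs.append(prev)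
--             ys.append(cur)
--             prev = cur
--         xs.append(prev)
--         ys.append(stoi['.'])
--     return xs, ys
-- ===== Notes on version B (the rewrite author's own statement) =====
-- stated objective: alternative
-- what changed: B never builds A's '.'-padded character list: it streams each word through a state machine carrying the previous index, doing one lookup per character (A does two per zipped pair) and emitting the closing (prev, '.') pair at word end.
import Mathlib
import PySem

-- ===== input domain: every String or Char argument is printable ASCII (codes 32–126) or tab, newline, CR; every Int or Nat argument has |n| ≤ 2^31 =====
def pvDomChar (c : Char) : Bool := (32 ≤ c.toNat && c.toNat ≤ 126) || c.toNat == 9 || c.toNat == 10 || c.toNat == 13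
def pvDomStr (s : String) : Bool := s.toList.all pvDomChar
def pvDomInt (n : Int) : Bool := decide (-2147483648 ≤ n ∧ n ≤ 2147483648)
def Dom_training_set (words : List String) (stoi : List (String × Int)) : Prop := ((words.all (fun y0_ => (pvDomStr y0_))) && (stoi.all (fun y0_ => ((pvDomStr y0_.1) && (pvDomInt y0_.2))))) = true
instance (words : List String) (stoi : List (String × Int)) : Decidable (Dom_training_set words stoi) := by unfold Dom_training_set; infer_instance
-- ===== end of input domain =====

-- B streams each word through a state machine carrying the previous index (one lookup
-- per character, closing pair at word end) instead of A's padded list + zipped-pair loop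
-- (objective: alternative).


-- ===== PORT A =====
-- stoi[ch]; Pre_ guarantees the key is present, so the `getD 0` default is never used
def pvLookup (stoi : List (String × Int)) (s : String) : Int :=
  ((PySem.Dict.mk stoi).get? s).getD 0

def training_set (words : List String) (stoi : List (String × Int)) : List Int × List Int :=
  words.foldl (fun acc w =>
    let chs : List String := ["."] ++ w.toList.map (fun c => String.ofList [c]) ++ ["."]
    (chs.zip chs.tail).foldl (fun acc p =>
      (acc.1 ++ [pvLookup stoi p.1], acc.2 ++ [pvLookup stoi p.2])) acc) ([], [])

-- ===== PORT B =====
-- state machine: (xs, ys, prev); one lookup per character, closing pair at word end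
def training_set_alt (words : List String) (stoi : List (String × Int)) : List Int × List Int :=
  words.foldl (fun acc w =>
    let st := w.toList.foldl
      (fun (s : List Int × List Int × Int) c =>
        let cur := pvLookup stoi (String.ofList [c])
        (s.1 ++ [s.2.2], s.2.1 ++ [cur], cur))
      (acc.1, acc.2, pvLookup stoi ".")
    (st.1 ++ [st.2.2], st.2.1 ++ [pvLookup stoi "."])) ([], [])

-- ===== PRECONDITION & SPEC =====
-- Pre_ excludes exactly the inputs on which Python A raises KeyError: some looked-up
-- key ('.' or a character of some word) is missing from stoi.
def Pre_training_set (words : List String) (stoi : List (String × Int)) : Prop :=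
  (words.all (fun w => ((PySem.Dict.mk stoi).get? ".").isSome &&
    w.toList.all (fun c => ((PySem.Dict.mk stoi).get? (String.ofList [c])).isSome))) = true
instance (words : List String) (stoi : List (String × Int)) : Decidable (Pre_training_set words stoi) := by unfold Pre_training_set; infer_instance

def pvWitness_training_set : List String × (List (String × Int)) :=
  (["ab", ""], [(".", 0), ("a", 1), ("b", 2)])

def Spec_training_set (words : List String) (stoi : List (String × Int)) (out : List Int × List Int) : Prop := out = training_set_alt words stoi
instance (words : List String) (stoi : List (String × Int)) (out : List Int × List Int) : Decidable (Spec_training_set words stoi out) := by unfold Spec_training_set; infer_instance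

-- ===== CLAIM (what is proved, stated in full; the proofs are below) =====
def Claim_equal_training_set : Prop := ∀ (words : List String) (stoi : List (String × Int)), Dom_training_set words stoi → Pre_training_set words stoi → Spec_training_set words stoi (training_set words stoi)

-- ===== LEMMAS AND PROOFS =====

-- A's inner pair loop over `chs` equals appending the two shifted slices of `chs.map f`
theorem pv_inner_eq (f : String → Int) :
    ∀ (chs : List String) (acc : List Int × List Int),
      (chs.zip chs.tail).foldl (fun acc p => (acc.1 ++ [f p.1], acc.2 ++ [f p.2])) acc
        = (acc.1 ++ (chs.map f).dropLast, acc.2 ++ (chs.map f).tail) := by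
  intro chs
  induction chs with
  | nil => simp
  | cons a rest ih =>
    intro acc
    cases rest with
    | nil => simp
    | cons b r =>
      have h := ih (acc.1 ++ [f a], acc.2 ++ [f b])
      simp only [List.tail_cons, List.zip_cons_cons, List.foldl_cons] at *
      rw [h]
      simp [List.dropLast_cons_of_ne_nil]

-- B's state-machine fold, characterised over the list of already-looked-up indices
theorem pv_state_eq :
    ∀ (l : List Int) (xs ys : List Int) (p : Int),
      l.foldl (fun (s : List Int × List Int × Int) x =>
          (s.1 ++ [s.2.2], s.2.1 ++ [x], x)) (xs, ys, p)
        = (xs ++ (p :: l).dropLast, ys ++ l, (p :: l).getLast (List.cons_ne_nil _ _)) := by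
  intro l
  induction l with
  | nil => intro xs ys p; simp
  | cons x t ih =>
    intro xs ys p
    have h := ih (xs ++ [p]) (ys ++ [x]) x
    simp only [List.foldl_cons] at *
    rw [h]
    cases t with
    | nil => simp
    | cons y r => simp [List.dropLast_cons_of_ne_nil]

-- per-word: A's body = B's body
theorem pv_body_eq (stoi : List (String × Int)) (w : String) (acc : List Int × List Int) :
    (let chs : List String := ["."] ++ w.toList.map (fun c => String.ofList [c]) ++ ["."]
     (chs.zip chs.tail).foldl (fun acc p =>
       (acc.1 ++ [pvLookup stoi p.1], acc.2 ++ [pvLookup stoi p.2])) acc)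
    = (let st := w.toList.foldl
         (fun (s : List Int × List Int × Int) c =>
           let cur := pvLookup stoi (String.ofList [c])
           (s.1 ++ [s.2.2], s.2.1 ++ [cur], cur))
         (acc.1, acc.2, pvLookup stoi ".")
       (st.1 ++ [st.2.2], st.2.1 ++ [pvLookup stoi "."])) := by
  simp only [pv_inner_eq (pvLookup stoi)]
  have hm : w.toList.foldl
      (fun (s : List Int × List Int × Int) c =>
        let cur := pvLookup stoi (String.ofList [c])
        (s.1 ++ [s.2.2], s.2.1 ++ [cur], cur))
      (acc.1, acc.2, pvLookup stoi ".")
      = (w.toList.map (fun c => pvLookup stoi (String.ofList [c]))).foldl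
          (fun (s : List Int × List Int × Int) x =>
            (s.1 ++ [s.2.2], s.2.1 ++ [x], x))
          (acc.1, acc.2, pvLookup stoi ".") := by
    rw [List.foldl_map]
  rw [hm, pv_state_eq]
  set d := pvLookup stoi "." with hd
  simp only [Function.comp_def, List.map_append, List.map_cons, List.map_nil, List.map_map]
  set l := w.toList.map (fun c => pvLookup stoi (String.ofList [c])) with hl
  rw [Prod.mk.injEq]
  refine ⟨?_, ?_⟩
  · conv_rhs => rw [List.append_assoc]
    congr 1
    rw [show ([d] ++ l ++ [d] : List Int) = (d :: l) ++ [d] by simp]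
    rw [List.dropLast_append_of_ne_nil]
    · simp [List.dropLast_concat_getLast]
    · simp
  · conv_rhs => rw [List.append_assoc]
    congr 1

-- ===== VERDICT (by name: the statement is the Claim_ definition above) =====
theorem training_set_spec : Claim_equal_training_set := by
  intro words stoi _ _
  unfold Spec_training_set training_set training_set_alt
  induction words using List.reverseRecOn with
  | nil => rfl
  | append_singleton ws w ih =>
    simp only [List.foldl_append, List.foldl_cons, List.foldl_nil, pv_body_eq]
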